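-- pv_equiv track=rewrite | github.com/Szymon-Budziak/Algorithms_and_Data_Structures_course_AGH | Dynamic Programming/21_2D_knapsack_problem.py | knapsack_problem_2D
-- ===== SOURCE A (Python) =====
-- def knapsack_problem_2D(P, W, H):
--     DP = [[[0] * (len(P) + 1) for _ in range(W + 1)] for _ in range(H + 1)]
--     for i in range(1, H + 1):
--         for j in range(1, W + 1):
--             for k in range(1, len(P) + 1):
--                 value = P[k - 1][0]
--                 weight = P[k - 1][1]
--                 height = P[k - 1][2]
--                 if i - height >= 0 and j - weight >= 0:
--                     DP[i][j][k] = max(DP[i][j][k], DP[i][j][k - 1],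
--                                       DP[i - height][j - weight][k - 1] + value)
--                 else:
--                     DP[i][j][k] = max(DP[i][j][k], DP[i][j][k - 1])
--     return DP[-1][-1][-1]
-- ===== SOURCE B (Python) =====
-- def knapsack_problem_2D(P, W, H):
--     # Rolling 2D table: drop the item dimension; items outer, capacities descending (0/1 semantics).
--     dp = [[0] * (W + 1) for _ in range(H + 1)]
--     for value, weight, height in P:
--         for i in range(H, 0, -1):
--             for j in range(W, 0, -1):
--                 if height <= i and weight <= j:
--                     dp[i][j] = max(dp[i][j], dp[i - height][j - weight] + value)
--     return dp[H][W]
-- ===== Notes on version B (the rewrite author's own statement) =====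
-- stated objective: alternative
-- what changed: Replaces the 3D table indexed by (height, width, item-prefix) filled in ascending index order by a rolling 2D table indexed by (height, width) only, with the item loop outermost and both capacity loops descending so each item is used at most once.
import Mathlib
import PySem

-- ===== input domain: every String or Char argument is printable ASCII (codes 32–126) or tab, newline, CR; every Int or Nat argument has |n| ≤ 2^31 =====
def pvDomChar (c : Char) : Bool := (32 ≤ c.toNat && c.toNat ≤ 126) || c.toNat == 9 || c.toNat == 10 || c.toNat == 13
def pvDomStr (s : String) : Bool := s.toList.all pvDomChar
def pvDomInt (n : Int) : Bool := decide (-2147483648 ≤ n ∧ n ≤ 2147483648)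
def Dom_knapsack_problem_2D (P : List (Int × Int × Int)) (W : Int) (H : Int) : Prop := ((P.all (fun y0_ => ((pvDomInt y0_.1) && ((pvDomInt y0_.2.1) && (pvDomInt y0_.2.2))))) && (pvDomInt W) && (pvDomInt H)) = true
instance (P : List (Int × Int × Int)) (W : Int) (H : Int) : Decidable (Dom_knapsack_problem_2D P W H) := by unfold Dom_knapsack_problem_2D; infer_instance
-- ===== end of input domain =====

-- B replaces A's 3D (height, width, item-prefix) table by a rolling 2D (height, width) table
-- with the item loop outermost and descending capacity loops (same 0/1 result, no item dimension).


-- ===== PORT A =====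
-- The 3D list-of-lists DP (sizes (H+1)×(W+1)×(len(P)+1), all cells initialised to 0) is modelled
-- as a dictionary from index triples to cell values with default 0: each Python read DP[a][b][c]
-- becomes .getD (a, b, c) 0 and each assignment DP[i][j][k] = e becomes .insert (i, j, k) e.
-- Inside Pre_ every index Python touches is in range, so this is exact.
def knapsack_problem_2D (P : List (Int × Int × Int)) (W : Int) (H : Int) : Int :=
  let DP0 : PySem.Dict (Int × Int × Int) Int := PySem.Dict.empty
  let DPf := (PySem.List.pyRange 1 (H + 1) 1).foldl (fun DP i =>
    (PySem.List.pyRange 1 (W + 1) 1).foldl (fun DP j =>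
      (PySem.List.pyRange 1 ((P.length : Int) + 1) 1).foldl (fun DP k =>
        let item := PySem.List.pyGetD P (k - 1) (0, 0, 0)  -- P[k-1]; k ∈ [1, len(P)], so in range
        let value := item.1
        let weight := item.2.1
        let height := item.2.2
        if i - height ≥ 0 ∧ j - weight ≥ 0 then
          DP.insert (i, j, k)
            (max (max (DP.getD (i, j, k) 0) (DP.getD (i, j, k - 1) 0))
                 (DP.getD (i - height, j - weight, k - 1) 0 + value))
        else
          DP.insert (i, j, k)
            (max (DP.getD (i, j, k) 0) (DP.getD (i, j, k - 1) 0))) DP) DP) DP0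
  -- DP[-1][-1][-1]: index -1 into lists of lengths H+1, W+1, len(P)+1 resolves to the last cell
  DPf.getD (-1 + (H + 1), -1 + (W + 1), -1 + ((P.length : Int) + 1)) 0

-- ===== PORT B =====
-- dp is the rolling 2D table (sizes (H+1)×(W+1), initialised to 0), modelled the same way.
def knapsack_problem_2D_alt (P : List (Int × Int × Int)) (W : Int) (H : Int) : Int :=
  let dp0 : PySem.Dict (Int × Int) Int := PySem.Dict.empty
  let dpf := P.foldl (fun dp item =>
    (PySem.List.pyRange H 0 (-1)).foldl (fun dp i =>
      (PySem.List.pyRange W 0 (-1)).foldl (fun dp j =>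
        if item.2.2 ≤ i ∧ item.2.1 ≤ j then
          dp.insert (i, j)
            (max (dp.getD (i, j) 0) (dp.getD (i - item.2.2, j - item.2.1) 0 + item.1))
        else dp) dp) dp) dp0
  dpf.getD (H, W) 0

-- ===== PRECONDITION & SPEC =====
-- Pre_ is EXACTLY the set of inputs on which Python A returns: A raises IndexError when a capacity
-- is negative, or when (with both capacities ≥ 1) some item's negative height (resp. width) passes
-- the fit test and drives the row (resp. column) index past the table edge.
def Pre_knapsack_problem_2D (P : List (Int × Int × Int)) (W : Int) (H : Int) : Prop :=
  0 ≤ W ∧ 0 ≤ H ∧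
    (∀ p ∈ P, (1 ≤ W ∧ 1 ≤ H) →
      ¬(p.2.2 < 0 ∧ p.2.1 ≤ W) ∧ ¬(p.2.1 < 0 ∧ p.2.2 ≤ H))
instance (P : List (Int × Int × Int)) (W : Int) (H : Int) : Decidable (Pre_knapsack_problem_2D P W H) := by
  unfold Pre_knapsack_problem_2D; infer_instance
def pvWitness_knapsack_problem_2D : (List (Int × Int × Int)) × Int × Int :=
  ([(3, 1, 1), (4, 2, 1), (5, 1, 2)], 3, 2)
def Spec_knapsack_problem_2D (P : List (Int × Int × Int)) (W : Int) (H : Int) (out : Int) : Prop := out = knapsack_problem_2D_alt P W H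
instance (P : List (Int × Int × Int)) (W : Int) (H : Int) (out : Int) : Decidable (Spec_knapsack_problem_2D P W H out) := by unfold Spec_knapsack_problem_2D; infer_instance

-- ===== CLAIM (what is proved, stated in full; the proofs are below) =====
def Claim_equal_knapsack_problem_2D : Prop := ∀ (P : List (Int × Int × Int)) (W : Int) (H : Int), Dom_knapsack_problem_2D P W H → Pre_knapsack_problem_2D P W H → Spec_knapsack_problem_2D P W H (knapsack_problem_2D P W H)

-- ===== LEMMAS AND PROOFS =====

-- Reference value: knapF l i j is the table value both programs compute at capacities (i, j)
-- after processing the items of l from RIGHT to LEFT (head of l = last item processed).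
def knapF : List (Int × Int × Int) → Int → Int → Int
  | [], _, _ => 0
  | (v, w, h) :: rest, i, j =>
    if i ≤ 0 ∨ j ≤ 0 then 0
    else if h ≤ i ∧ w ≤ j then max (knapF rest i j) (knapF rest (i - h) (j - w) + v)
    else knapF rest i j

lemma knapF_nonneg (l : List (Int × Int × Int)) (i j : Int) : 0 ≤ knapF l i j := by
  induction l generalizing i j with
  | nil => simp [knapF]
  | cons p rest ih =>
    obtain ⟨v, w, h⟩ := p
    simp only [knapF]
    split_ifs with h1 h2
    · exact le_refl 0
    · exact le_trans (ih i j) (le_max_left _ _)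
    · exact ih i j

lemma knapF_boundary (l : List (Int × Int × Int)) {i j : Int} (hb : i ≤ 0 ∨ j ≤ 0) :
    knapF l i j = 0 := by
  cases l with
  | nil => simp [knapF]
  | cons p rest => obtain ⟨v, w, h⟩ := p; simp [knapF, hb]

-- Items admissible inside Pre_ when both capacities are ≥ 1.
def okItem (W H : Int) (p : Int × Int × Int) : Prop :=
  ¬(p.2.2 < 0 ∧ p.2.1 ≤ W) ∧ ¬(p.2.1 < 0 ∧ p.2.2 ≤ H)

lemma knapF_cons (v w h i j : Int) (l : List (Int × Int × Int)) (hi : 1 ≤ i) (hj : 1 ≤ j) :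
    knapF ((v, w, h) :: l) i j
      = if h ≤ i ∧ w ≤ j then max (knapF l i j) (knapF l (i - h) (j - w) + v)
        else knapF l i j := by
  simp only [knapF]
  rw [if_neg (by omega)]

-- ---- B side ----

lemma B_jpass (v w h : Int) (l : List (Int × Int × Int)) (W H i : Int)
    (hok : okItem W H (v, w, h)) (hi1 : 1 ≤ i) (hiH : i ≤ H) :
    ∀ (m : Nat) (dp : PySem.Dict (Int × Int) Int), (m : Int) ≤ W →
    (∀ a b, 0 ≤ a → a ≤ H → 0 ≤ b → b ≤ W →
      dp.getD (a, b) 0 = if i < a ∨ (a = i ∧ (m : Int) < b) then knapF ((v, w, h) :: l) a b else knapF l a b) →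
    ∀ a b, 0 ≤ a → a ≤ H → 0 ≤ b → b ≤ W →
      ((PySem.List.pyRange (m : Int) 0 (-1)).foldl (fun dp j =>
        if (v, w, h).2.2 ≤ i ∧ (v, w, h).2.1 ≤ j then
          dp.insert (i, j)
            (max (dp.getD (i, j) 0) (dp.getD (i - (v, w, h).2.2, j - (v, w, h).2.1) 0 + (v, w, h).1))
        else dp) dp).getD (a, b) 0
      = if i < a ∨ a = i then knapF ((v, w, h) :: l) a b else knapF l a b := by
  obtain ⟨hok1, hok2⟩ := hok
  simp only at hok1 hok2
  intro m
  induction m with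
  | zero =>
    intro dp _ hdp a b ha0 haH hb0 hbW
    rw [show ((0 : Nat) : Int) = 0 from rfl, PySem.List.pyRange_neg_one_eq_nil (le_refl 0)]
    simp only [List.foldl_nil]
    rw [hdp a b ha0 haH hb0 hbW]
    by_cases hai : a = i
    · subst hai
      by_cases hb : (0 : Int) < b
      · rw [if_pos (by omega), if_pos (by omega)]
      · have hb' : b = 0 := by omega
        subst hb'
        rw [if_neg (by omega), if_pos (by omega),
          knapF_boundary _ (Or.inr (le_refl 0)), knapF_boundary _ (Or.inr (le_refl 0))]
    · by_cases hia : i < a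
      · rw [if_pos (by omega), if_pos (by omega)]
      · rw [if_neg (by omega), if_neg (by omega)]
  | succ m ih =>
    intro dp hmW hdp a b ha0 haH hb0 hbW
    have hj1 : (1 : Int) ≤ ((m + 1 : Nat) : Int) := by push_cast; omega
    rw [PySem.List.pyRange_neg_one_cons (show (0 : Int) < ((m + 1 : Nat) : Int) by omega)]
    simp only [List.foldl_cons]
    have hstep : ((m + 1 : Nat) : Int) - 1 = ((m : Nat) : Int) := by push_cast; ring
    rw [hstep]
    set j : Int := ((m + 1 : Nat) : Int) with hjdef
    have hjm : j = (m : Int) + 1 := by push_cast [hjdef]; ring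
    have hjW : j ≤ W := hmW
    -- the one loop-body step at column j
    refine ih _ (by omega) ?_ a b ha0 haH hb0 hbW
    intro a2 b2 ha02 haH2 hb02 hbW2
    by_cases hcond : h ≤ i ∧ w ≤ j
    · -- item fits at (i, j): the cell (i, j) is written
      have hh0 : 0 ≤ h := by by_contra hc; exact hok1 ⟨by omega, by omega⟩
      have hw0 : 0 ≤ w := by by_contra hc; exact hok2 ⟨by omega, by omega⟩
      rw [if_pos hcond, PySem.Dict.getD_insert]
      by_cases hab : a2 = i ∧ b2 = j
      · rw [if_pos (show ((a2, b2) : Int × Int) = (i, j) by rw [hab.1, hab.2]), hab.1, hab.2]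
        have hdij : dp.getD (i, j) 0 = knapF l i j := by
          rw [hdp i j (by omega) hiH (by omega) hjW, if_neg (by omega)]
        have hdrd : dp.getD (i - h, j - w) 0 = knapF l (i - h) (j - w) := by
          rw [hdp (i - h) (j - w) (by omega) (by omega) (by omega) (by omega),
            if_neg (by omega)]
        rw [hdij, hdrd, if_pos (by omega),
          knapF_cons v w h i j l hi1 (by omega), if_pos hcond]
      · rw [if_neg (show ¬(((a2, b2) : Int × Int) = (i, j)) by simp only [Prod.mk.injEq]; omega),
          hdp a2 b2 ha02 haH2 hb02 hbW2]
        by_cases hc1 : i < a2 ∨ (a2 = i ∧ j < b2)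
        · rw [if_pos hc1, if_pos (by omega)]
        · rw [if_neg hc1, if_neg (by omega)]
    · -- item does not fit at (i, j): nothing written, but knapF agrees at (i, j)
      rw [if_neg hcond, hdp a2 b2 ha02 haH2 hb02 hbW2]
      by_cases hab : a2 = i ∧ b2 = j
      · rw [hab.1, hab.2, if_neg (by omega), if_pos (by omega),
          knapF_cons v w h i j l hi1 (by omega), if_neg hcond]
      · by_cases hc1 : i < a2 ∨ (a2 = i ∧ j < b2)
        · rw [if_pos hc1, if_pos (by omega)]
        · rw [if_neg hc1, if_neg (by omega)]

lemma B_ipass (v w h : Int) (l : List (Int × Int × Int)) (W H : Int)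
    (hok : okItem W H (v, w, h)) (hW : 1 ≤ W) :
    ∀ (m : Nat) (dp : PySem.Dict (Int × Int) Int), (m : Int) ≤ H →
    (∀ a b, 0 ≤ a → a ≤ H → 0 ≤ b → b ≤ W →
      dp.getD (a, b) 0 = if (m : Int) < a then knapF ((v, w, h) :: l) a b else knapF l a b) →
    ∀ a b, 0 ≤ a → a ≤ H → 0 ≤ b → b ≤ W →
      ((PySem.List.pyRange (m : Int) 0 (-1)).foldl (fun dp i =>
        (PySem.List.pyRange W 0 (-1)).foldl (fun dp j =>
          if (v, w, h).2.2 ≤ i ∧ (v, w, h).2.1 ≤ j then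
            dp.insert (i, j)
              (max (dp.getD (i, j) 0) (dp.getD (i - (v, w, h).2.2, j - (v, w, h).2.1) 0 + (v, w, h).1))
          else dp) dp) dp).getD (a, b) 0
      = knapF ((v, w, h) :: l) a b := by
  intro m
  induction m with
  | zero =>
    intro dp _ hdp a b ha0 haH hb0 hbW
    rw [show ((0 : Nat) : Int) = 0 from rfl, PySem.List.pyRange_neg_one_eq_nil (le_refl 0)]
    simp only [List.foldl_nil]
    rw [hdp a b ha0 haH hb0 hbW]
    by_cases ha : ((0 : Nat) : Int) < a
    · rw [if_pos ha]
    · have haa : a = 0 := by omega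
      rw [if_neg ha, haa, knapF_boundary _ (Or.inl (le_refl 0)),
        knapF_boundary _ (Or.inl (le_refl 0))]
  | succ m ih =>
    intro dp hmH hdp a b ha0 haH hb0 hbW
    rw [PySem.List.pyRange_neg_one_cons (show (0 : Int) < ((m + 1 : Nat) : Int) by omega)]
    simp only [List.foldl_cons]
    have hstep : ((m + 1 : Nat) : Int) - 1 = ((m : Nat) : Int) := by push_cast; ring
    rw [hstep]
    set i : Int := ((m + 1 : Nat) : Int) with hidef
    have him : i = (m : Int) + 1 := by rw [hidef]; push_cast; ring
    refine ih _ (by omega) ?_ a b ha0 haH hb0 hbW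
    intro a2 b2 ha02 haH2 hb02 hbW2
    -- one full row at height i, via B_jpass with the column range W = (W.toNat : Int)
    have hWt : W = ((W.toNat : Nat) : Int) := (Int.toNat_of_nonneg (by omega)).symm
    rw [hWt]
    rw [B_jpass v w h l W H i hok (by omega) (by omega) W.toNat dp (by omega)
      (fun a b ha0 haH hb0 hbW => by
        rw [hdp a b ha0 haH hb0 hbW]
        by_cases hc1 : i < a ∨ (a = i ∧ ((W.toNat : Nat) : Int) < b)
        · rw [if_pos hc1, if_pos (by omega)]
        · rw [if_neg hc1, if_neg (by omega)])
      a2 b2 ha02 haH2 hb02 (by omega)]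
    by_cases hc2 : i < a2 ∨ a2 = i
    · rw [if_pos hc2, if_pos (by omega)]
    · rw [if_neg hc2, if_neg (by omega)]

lemma B_items (W H : Int) (hW : 1 ≤ W) (hH : 1 ≤ H) :
    ∀ (P : List (Int × Int × Int)) (l : List (Int × Int × Int)) (dp : PySem.Dict (Int × Int) Int),
    (∀ p ∈ P, okItem W H p) →
    (∀ a b, 0 ≤ a → a ≤ H → 0 ≤ b → b ≤ W → dp.getD (a, b) 0 = knapF l a b) →
    ∀ a b, 0 ≤ a → a ≤ H → 0 ≤ b → b ≤ W →
      (P.foldl (fun dp item =>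
        (PySem.List.pyRange H 0 (-1)).foldl (fun dp i =>
          (PySem.List.pyRange W 0 (-1)).foldl (fun dp j =>
            if item.2.2 ≤ i ∧ item.2.1 ≤ j then
              dp.insert (i, j)
                (max (dp.getD (i, j) 0) (dp.getD (i - item.2.2, j - item.2.1) 0 + item.1))
            else dp) dp) dp) dp).getD (a, b) 0
      = knapF (P.reverse ++ l) a b := by
  intro P
  induction P with
  | nil =>
    intro l dp _ hdp a b ha0 haH hb0 hbW
    simp only [List.foldl_nil, List.reverse_nil, List.nil_append]
    exact hdp a b ha0 haH hb0 hbW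
  | cons p rest ih =>
    intro l dp hok hdp a b ha0 haH hb0 hbW
    obtain ⟨v, w, h⟩ := p
    simp only [List.foldl_cons]
    have hres : (rest.reverse ++ ((v, w, h) :: l)) = ((v, w, h) :: rest).reverse ++ l := by
      simp [List.reverse_cons, List.append_assoc]
    rw [← hres]
    refine ih ((v, w, h) :: l) _ (fun q hq => hok q (List.mem_cons_of_mem _ hq)) ?_ a b ha0 haH hb0 hbW
    intro a2 b2 ha02 haH2 hb02 hbW2
    -- one full item pass, via B_ipass with the row range H = (H.toNat : Int)
    have hHt : H = ((H.toNat : Nat) : Int) := (Int.toNat_of_nonneg (by omega)).symm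
    rw [hHt]
    exact B_ipass v w h l W H (hok _ (List.mem_cons_self)) hW H.toNat dp (by omega)
      (fun a b ha0 haH hb0 hbW => by
        rw [hdp a b ha0 haH hb0 hbW, if_neg (by omega)])
      a2 b2 ha02 (by omega) hb02 hbW2

lemma B_value (P : List (Int × Int × Int)) (W H : Int)
    (hW : 1 ≤ W) (hH : 1 ≤ H) (hok : ∀ p ∈ P, okItem W H p) :
    knapsack_problem_2D_alt P W H = knapF P.reverse H W := by
  have hmain := B_items W H hW hH P [] PySem.Dict.empty hok
    (fun a b _ _ _ _ => by rw [PySem.Dict.getD_empty]; rfl)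
    H W (by omega) (le_refl H) (by omega) (le_refl W)
  rw [List.append_nil] at hmain
  exact hmain

-- ---- A side ----

-- Value of the table after the first c items (as a prefix of P) have been processed.
def knapPre (P : List (Int × Int × Int)) (c : Int) (a b : Int) : Int :=
  knapF ((P.take c.toNat).reverse) a b

lemma knapPre_zero (P : List (Int × Int × Int)) {a b c : Int} (hc : a ≤ 0 ∨ b ≤ 0 ∨ c ≤ 0) :
    knapPre P c a b = 0 := by
  rcases hc with h | h | h
  · exact knapF_boundary _ (Or.inl h)
  · exact knapF_boundary _ (Or.inr h)
  · have h0 : c.toNat = 0 := by omega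
    simp [knapPre, h0, knapF]

lemma knapPre_nonneg (P : List (Int × Int × Int)) (c a b : Int) : 0 ≤ knapPre P c a b :=
  knapF_nonneg _ _ _

lemma knapF_consP (p : Int × Int × Int) (l : List (Int × Int × Int)) (i j : Int)
    (hi : 1 ≤ i) (hj : 1 ≤ j) :
    knapF (p :: l) i j = if p.2.2 ≤ i ∧ p.2.1 ≤ j then
        max (knapF l i j) (knapF l (i - p.2.2) (j - p.2.1) + p.1)
      else knapF l i j := by
  obtain ⟨v, w, h⟩ := p
  exact knapF_cons v w h i j l hi hj

lemma knapPre_succ (P : List (Int × Int × Int)) (k : Int) (hk1 : 1 ≤ k)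
    (hlt : (k - 1).toNat < P.length) (a b : Int) (ha : 1 ≤ a) (hb : 1 ≤ b) :
    knapPre P k a b = if (P[(k - 1).toNat]'hlt).2.2 ≤ a ∧ (P[(k - 1).toNat]'hlt).2.1 ≤ b then
        max (knapPre P (k - 1) a b)
          (knapPre P (k - 1) (a - (P[(k - 1).toNat]'hlt).2.2) (b - (P[(k - 1).toNat]'hlt).2.1)
            + (P[(k - 1).toNat]'hlt).1)
      else knapPre P (k - 1) a b := by
  have hst : k.toNat = (k - 1).toNat + 1 := by omega
  unfold knapPre
  rw [hst, List.take_add_one, List.getElem?_eq_getElem hlt]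
  simp only [Option.toList_some, List.reverse_append, List.reverse_cons, List.reverse_nil,
    List.nil_append, List.cons_append]
  exact knapF_consP _ _ a b ha hb

lemma A_kpass (P : List (Int × Int × Int)) (W H i j : Int)
    (hok : ∀ p ∈ P, okItem W H p)
    (hi1 : 1 ≤ i) (hiH : i ≤ H) (hj1 : 1 ≤ j) (hjW : j ≤ W) :
    ∀ (m : Nat) (k : Int) (DP : PySem.Dict (Int × Int × Int) Int), 1 ≤ k →
    k + (m : Int) = (P.length : Int) + 1 →
    (∀ a b c, 0 ≤ a → a ≤ H → 0 ≤ b → b ≤ W → 0 ≤ c → c ≤ (P.length : Int) →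
      DP.getD (a, b, c) 0 = if a ≤ 0 ∨ b ≤ 0 ∨ c ≤ 0 ∨ a < i ∨ (a = i ∧ (b < j ∨ (b = j ∧ c < k)))
        then knapPre P c a b else 0) →
    ∀ a b c, 0 ≤ a → a ≤ H → 0 ≤ b → b ≤ W → 0 ≤ c → c ≤ (P.length : Int) →
      ((PySem.List.pyRange k ((P.length : Int) + 1) 1).foldl (fun DP k =>
        let item := PySem.List.pyGetD P (k - 1) (0, 0, 0)
        let value := item.1
        let weight := item.2.1
        let height := item.2.2
        if i - height ≥ 0 ∧ j - weight ≥ 0 then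
          DP.insert (i, j, k)
            (max (max (DP.getD (i, j, k) 0) (DP.getD (i, j, k - 1) 0))
                 (DP.getD (i - height, j - weight, k - 1) 0 + value))
        else
          DP.insert (i, j, k)
            (max (DP.getD (i, j, k) 0) (DP.getD (i, j, k - 1) 0))) DP).getD (a, b, c) 0
      = if a ≤ 0 ∨ b ≤ 0 ∨ c ≤ 0 ∨ a < i ∨ (a = i ∧ (b < j ∨ b = j))
        then knapPre P c a b else 0 := by
  intro m
  induction m with
  | zero =>
    intro k DP hk1 hkm hDP a b c ha0 haH hb0 hbW hc0 hcn
    rw [PySem.List.pyRange_one_eq_nil (by omega)]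
    simp only [List.foldl_nil]
    rw [hDP a b c ha0 haH hb0 hbW hc0 hcn]
    by_cases hc : a ≤ 0 ∨ b ≤ 0 ∨ c ≤ 0 ∨ a < i ∨ (a = i ∧ (b < j ∨ b = j))
    · rw [if_pos (by omega), if_pos hc]
    · rw [if_neg (by omega), if_neg hc]
  | succ m ih =>
    intro k DP hk1 hkm hDP a b c ha0 haH hb0 hbW hc0 hcn
    rw [PySem.List.pyRange_one_cons (show k < (P.length : Int) + 1 by omega)]
    simp only [List.foldl_cons]
    refine ih (k + 1) _ (by omega) (by push_cast at hkm ⊢; omega) ?_ a b c ha0 haH hb0 hbW hc0 hcn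
    intro a2 b2 c2 ha02 haH2 hb02 hbW2 hc02 hcn2
    -- the single step writing cell (i, j, k)
    have hklen : (k - 1).toNat < P.length := by omega
    have hget : PySem.List.pyGetD P (k - 1) (0, 0, 0) = P[(k - 1).toNat]'hklen :=
      PySem.List.pyGetD_eq_getElem P (0, 0, 0) (by omega) (by omega)
    simp only [hget]
    have hmem : P[(k - 1).toNat]'hklen ∈ P := List.getElem_mem hklen
    set p := P[(k - 1).toNat]'hklen with hpdef
    obtain ⟨hok1, hok2⟩ := hok p hmem
    by_cases hcond : i - p.2.2 ≥ 0 ∧ j - p.2.1 ≥ 0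
    · rw [if_pos hcond, PySem.Dict.getD_insert]
      have hh0 : 0 ≤ p.2.2 := by
        by_contra hcc; exact hok1 ⟨by omega, by omega⟩
      have hw0 : 0 ≤ p.2.1 := by
        by_contra hcc; exact hok2 ⟨by omega, by omega⟩
      by_cases habc : a2 = i ∧ b2 = j ∧ c2 = k
      · rw [if_pos (show ((a2, b2, c2) : Int × Int × Int) = (i, j, k) by
            rw [habc.1, habc.2.1, habc.2.2]), habc.1, habc.2.1, habc.2.2]
        have h1 : DP.getD (i, j, k) 0 = 0 := by
          rw [hDP i j k (by omega) hiH (by omega) hjW (by omega) (by omega), if_neg (by omega)]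
        have h2 : DP.getD (i, j, k - 1) 0 = knapPre P (k - 1) i j := by
          rw [hDP i j (k - 1) (by omega) hiH (by omega) hjW (by omega) (by omega),
            if_pos (by omega)]
        have h3 : DP.getD (i - p.2.2, j - p.2.1, k - 1) 0
            = knapPre P (k - 1) (i - p.2.2) (j - p.2.1) := by
          rw [hDP (i - p.2.2) (j - p.2.1) (k - 1) (by omega) (by omega) (by omega) (by omega)
            (by omega) (by omega), if_pos (by omega)]
        rw [h1, h2, h3, max_eq_right (knapPre_nonneg P (k - 1) i j), if_pos (by omega),
          knapPre_succ P k hk1 hklen i j hi1 hj1, ← hpdef, if_pos ⟨by omega, by omega⟩]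
      · rw [if_neg (show ¬(((a2, b2, c2) : Int × Int × Int) = (i, j, k)) by
            simp only [Prod.mk.injEq]; omega),
          hDP a2 b2 c2 ha02 haH2 hb02 hbW2 hc02 hcn2]
        by_cases hc1 : a2 ≤ 0 ∨ b2 ≤ 0 ∨ c2 ≤ 0 ∨ a2 < i ∨ (a2 = i ∧ (b2 < j ∨ (b2 = j ∧ c2 < k)))
        · rw [if_pos hc1, if_pos (by omega)]
        · rw [if_neg hc1, if_neg (by omega)]
    · rw [if_neg hcond, PySem.Dict.getD_insert]
      by_cases habc : a2 = i ∧ b2 = j ∧ c2 = k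
      · rw [if_pos (show ((a2, b2, c2) : Int × Int × Int) = (i, j, k) by
            rw [habc.1, habc.2.1, habc.2.2]), habc.1, habc.2.1, habc.2.2]
        have h1 : DP.getD (i, j, k) 0 = 0 := by
          rw [hDP i j k (by omega) hiH (by omega) hjW (by omega) (by omega), if_neg (by omega)]
        have h2 : DP.getD (i, j, k - 1) 0 = knapPre P (k - 1) i j := by
          rw [hDP i j (k - 1) (by omega) hiH (by omega) hjW (by omega) (by omega),
            if_pos (by omega)]
        rw [h1, h2, max_eq_right (knapPre_nonneg P (k - 1) i j), if_pos (by omega),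
          knapPre_succ P k hk1 hklen i j hi1 hj1, ← hpdef, if_neg (by omega)]
      · rw [if_neg (show ¬(((a2, b2, c2) : Int × Int × Int) = (i, j, k)) by
            simp only [Prod.mk.injEq]; omega),
          hDP a2 b2 c2 ha02 haH2 hb02 hbW2 hc02 hcn2]
        by_cases hc1 : a2 ≤ 0 ∨ b2 ≤ 0 ∨ c2 ≤ 0 ∨ a2 < i ∨ (a2 = i ∧ (b2 < j ∨ (b2 = j ∧ c2 < k)))
        · rw [if_pos hc1, if_pos (by omega)]
        · rw [if_neg hc1, if_neg (by omega)]

lemma A_jpass (P : List (Int × Int × Int)) (W H i : Int)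
    (hok : ∀ p ∈ P, okItem W H p) (hi1 : 1 ≤ i) (hiH : i ≤ H) :
    ∀ (m : Nat) (j : Int) (DP : PySem.Dict (Int × Int × Int) Int), 1 ≤ j →
    j + (m : Int) = W + 1 →
    (∀ a b c, 0 ≤ a → a ≤ H → 0 ≤ b → b ≤ W → 0 ≤ c → c ≤ (P.length : Int) →
      DP.getD (a, b, c) 0 = if a ≤ 0 ∨ b ≤ 0 ∨ c ≤ 0 ∨ a < i ∨ (a = i ∧ b < j)
        then knapPre P c a b else 0) →
    ∀ a b c, 0 ≤ a → a ≤ H → 0 ≤ b → b ≤ W → 0 ≤ c → c ≤ (P.length : Int) →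
      ((PySem.List.pyRange j (W + 1) 1).foldl (fun DP j =>
        (PySem.List.pyRange 1 ((P.length : Int) + 1) 1).foldl (fun DP k =>
          let item := PySem.List.pyGetD P (k - 1) (0, 0, 0)
          let value := item.1
          let weight := item.2.1
          let height := item.2.2
          if i - height ≥ 0 ∧ j - weight ≥ 0 then
            DP.insert (i, j, k)
              (max (max (DP.getD (i, j, k) 0) (DP.getD (i, j, k - 1) 0))
                   (DP.getD (i - height, j - weight, k - 1) 0 + value))
          else
            DP.insert (i, j, k)
              (max (DP.getD (i, j, k) 0) (DP.getD (i, j, k - 1) 0))) DP) DP).getD (a, b, c) 0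
      = if a ≤ 0 ∨ b ≤ 0 ∨ c ≤ 0 ∨ a < i ∨ a = i then knapPre P c a b else 0 := by
  intro m
  induction m with
  | zero =>
    intro j DP hj1 hjm hDP a b c ha0 haH hb0 hbW hc0 hcn
    rw [PySem.List.pyRange_one_eq_nil (show W + 1 ≤ j by omega)]
    simp only [List.foldl_nil]
    rw [hDP a b c ha0 haH hb0 hbW hc0 hcn]
    by_cases hc : a ≤ 0 ∨ b ≤ 0 ∨ c ≤ 0 ∨ a < i ∨ a = i
    · rw [if_pos (by omega), if_pos hc]
    · rw [if_neg (by omega), if_neg hc]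
  | succ m ih =>
    intro j DP hj1 hjm hDP a b c ha0 haH hb0 hbW hc0 hcn
    rw [PySem.List.pyRange_one_cons (show j < W + 1 by omega)]
    simp only [List.foldl_cons]
    refine ih (j + 1) _ (by omega) (by push_cast at hjm; omega) ?_ a b c ha0 haH hb0 hbW hc0 hcn
    intro a2 b2 c2 ha02 haH2 hb02 hbW2 hc02 hcn2
    rw [A_kpass P W H i j hok hi1 hiH hj1 (by omega) P.length 1 DP (le_refl 1)
      (by omega)
      (fun a3 b3 c3 ha03 haH3 hb03 hbW3 hc03 hcn3 => by
        rw [hDP a3 b3 c3 ha03 haH3 hb03 hbW3 hc03 hcn3]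
        by_cases hc1 : a3 ≤ 0 ∨ b3 ≤ 0 ∨ c3 ≤ 0 ∨ a3 < i ∨ (a3 = i ∧ b3 < j)
        · rw [if_pos hc1, if_pos (by omega)]
        · rw [if_neg hc1, if_neg (by omega)])
      a2 b2 c2 ha02 haH2 hb02 hbW2 hc02 hcn2]
    by_cases hc2 : a2 ≤ 0 ∨ b2 ≤ 0 ∨ c2 ≤ 0 ∨ a2 < i ∨ (a2 = i ∧ (b2 < j ∨ b2 = j))
    · rw [if_pos hc2, if_pos (by omega)]
    · rw [if_neg hc2, if_neg (by omega)]

lemma A_ipass (P : List (Int × Int × Int)) (W H : Int)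
    (hok : ∀ p ∈ P, okItem W H p) (hW0 : 0 ≤ W) :
    ∀ (m : Nat) (i : Int) (DP : PySem.Dict (Int × Int × Int) Int), 1 ≤ i →
    i + (m : Int) = H + 1 →
    (∀ a b c, 0 ≤ a → a ≤ H → 0 ≤ b → b ≤ W → 0 ≤ c → c ≤ (P.length : Int) →
      DP.getD (a, b, c) 0 = if a ≤ 0 ∨ b ≤ 0 ∨ c ≤ 0 ∨ a < i then knapPre P c a b else 0) →
    ∀ a b c, 0 ≤ a → a ≤ H → 0 ≤ b → b ≤ W → 0 ≤ c → c ≤ (P.length : Int) →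
      ((PySem.List.pyRange i (H + 1) 1).foldl (fun DP i =>
        (PySem.List.pyRange 1 (W + 1) 1).foldl (fun DP j =>
          (PySem.List.pyRange 1 ((P.length : Int) + 1) 1).foldl (fun DP k =>
            let item := PySem.List.pyGetD P (k - 1) (0, 0, 0)
            let value := item.1
            let weight := item.2.1
            let height := item.2.2
            if i - height ≥ 0 ∧ j - weight ≥ 0 then
              DP.insert (i, j, k)
                (max (max (DP.getD (i, j, k) 0) (DP.getD (i, j, k - 1) 0))
                     (DP.getD (i - height, j - weight, k - 1) 0 + value))
            else
              DP.insert (i, j, k)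
                (max (DP.getD (i, j, k) 0) (DP.getD (i, j, k - 1) 0))) DP) DP) DP).getD (a, b, c) 0
      = knapPre P c a b := by
  intro m
  induction m with
  | zero =>
    intro i DP hi1 him hDP a b c ha0 haH hb0 hbW hc0 hcn
    rw [PySem.List.pyRange_one_eq_nil (show H + 1 ≤ i by omega)]
    simp only [List.foldl_nil]
    rw [hDP a b c ha0 haH hb0 hbW hc0 hcn, if_pos (by omega)]
  | succ m ih =>
    intro i DP hi1 him hDP a b c ha0 haH hb0 hbW hc0 hcn
    rw [PySem.List.pyRange_one_cons (show i < H + 1 by omega)]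
    simp only [List.foldl_cons]
    refine ih (i + 1) _ (by omega) (by push_cast at him ⊢; omega) ?_ a b c ha0 haH hb0 hbW hc0 hcn
    intro a2 b2 c2 ha02 haH2 hb02 hbW2 hc02 hcn2
    rw [A_jpass P W H i hok hi1 (by omega) W.toNat 1 DP (le_refl 1) (by omega)
      (fun a3 b3 c3 ha03 haH3 hb03 hbW3 hc03 hcn3 => by
        rw [hDP a3 b3 c3 ha03 haH3 hb03 hbW3 hc03 hcn3]
        by_cases hc1 : a3 ≤ 0 ∨ b3 ≤ 0 ∨ c3 ≤ 0 ∨ a3 < i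
        · rw [if_pos hc1, if_pos (by omega)]
        · rw [if_neg hc1, if_neg (by omega)])
      a2 b2 c2 ha02 haH2 hb02 hbW2 hc02 hcn2]
    by_cases hc2 : a2 ≤ 0 ∨ b2 ≤ 0 ∨ c2 ≤ 0 ∨ a2 < i ∨ a2 = i
    · rw [if_pos hc2, if_pos (by omega)]
    · rw [if_neg hc2, if_neg (by omega)]

lemma A_value (P : List (Int × Int × Int)) (W H : Int)
    (hW : 1 ≤ W) (hH : 1 ≤ H) (hok : ∀ p ∈ P, okItem W H p) :
    knapsack_problem_2D P W H = knapF P.reverse H W := by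
  unfold knapsack_problem_2D
  rw [show (-1 : Int) + (H + 1) = H by ring, show (-1 : Int) + (W + 1) = W by ring,
    show (-1 : Int) + ((P.length : Int) + 1) = (P.length : Int) by ring]
  have hmain := A_ipass P W H hok (by omega) H.toNat 1 PySem.Dict.empty (le_refl 1) (by omega)
    (fun a b c ha0 haH hb0 hbW hc0 hcn => by
      rw [PySem.Dict.getD_empty]
      by_cases hcnd : a ≤ 0 ∨ b ≤ 0 ∨ c ≤ 0 ∨ a < 1
      · rw [if_pos hcnd, knapPre_zero P (by omega)]
      · rw [if_neg hcnd])
    H W (P.length : Int) (by omega) (le_refl H) (by omega) (le_refl W) (by omega) (le_refl _)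
  have hfin : knapPre P (P.length : Int) H W = knapF P.reverse H W := by
    simp [knapPre]
  exact hmain.trans hfin

lemma A_degenerate (P : List (Int × Int × Int)) (W H : Int) (hdeg : W = 0 ∨ H = 0) :
    knapsack_problem_2D P W H = 0 := by
  rcases hdeg with h | h
  · subst h
    simp [knapsack_problem_2D, PySem.List.pyRange_one_eq_nil, PySem.Dict.getD_empty]
  · subst h
    simp [knapsack_problem_2D, PySem.List.pyRange_one_eq_nil, PySem.Dict.getD_empty]

lemma B_degenerate (P : List (Int × Int × Int)) (W H : Int) (hdeg : W = 0 ∨ H = 0) :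
    knapsack_problem_2D_alt P W H = 0 := by
  rcases hdeg with h | h
  · subst h
    simp [knapsack_problem_2D_alt, PySem.List.pyRange_neg_one_eq_nil, PySem.Dict.getD_empty]
  · subst h
    simp [knapsack_problem_2D_alt, PySem.List.pyRange_neg_one_eq_nil, PySem.Dict.getD_empty]

-- ===== VERDICT (by name: the statement is the Claim_ definition above) =====
theorem knapsack_problem_2D_spec : Claim_equal_knapsack_problem_2D := by
  intro P W H _ hpre
  obtain ⟨hW0, hH0, hok⟩ := hpre
  unfold Spec_knapsack_problem_2D
  by_cases hWH : 1 ≤ W ∧ 1 ≤ H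
  · have hok2 : ∀ p ∈ P, okItem W H p := fun p hp => hok p hp hWH
    rw [A_value P W H hWH.1 hWH.2 hok2, B_value P W H hWH.1 hWH.2 hok2]
  · have hdeg : W = 0 ∨ H = 0 := by omega
    rw [A_degenerate P W H hdeg, B_degenerate P W H hdeg]
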